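-- pv_equiv track=rewrite | github.com/gamja99/algorithm-test | programmers/완전탐색/모의고사.py | solution
-- ===== SOURCE A (Python) =====
-- def solution(answers):
--     n1 = [1,2,3,4,5,]
--     n2 = [2,1,2,3,2,4,2,5]
--     n3 = [3,3,1,1,2,2,4,4,5,5]
--     score=[0,0,0]
--
--     for x in range(0,len(answers)):
--         if n1[x%5] == answers[x]:
--             score[0]+=1
--         if n2[x%8] == answers[x]:
--             score[1]+=1
--         if n3[x%10] == answers[x]:
--             score[2]+=1
--     mx = max(score)
--
--     for x in range(3):
--         if score[x] == mx:
--             score.append(x+1)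
--     return score[3:]
-- ===== SOURCE B (Python) =====
-- def solution(answers):
--     # All three patterns repeat with period dividing 40, so one pass builds a
--     # histogram keyed by (position mod 40, answer); each pattern's score is then
--     # read off the histogram with 40 lookups, independent of len(answers).
--     pats = [[1, 2, 3, 4, 5],
--             [2, 1, 2, 3, 2, 4, 2, 5],
--             [3, 3, 1, 1, 2, 2, 4, 4, 5, 5]]
--     hist = {}
--     for i, a in enumerate(answers):
--         k = (i % 40, a)
--         hist[k] = hist.get(k, 0) + 1
--     scores = [sum(hist.get((j, pat[j % len(pat)]), 0) for j in range(40))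
--               for pat in pats]
--     mx = max(scores)
--     return [i + 1 for i, s in enumerate(scores) if s == mx]
-- ===== Notes on version B (the rewrite author's own statement) =====
-- stated objective: alternative
-- what changed: Replaces A's per-element three-way comparison loop by a single pass building a histogram keyed by (index mod 40, answer) -- 40 being a common period of all three patterns -- from which each pattern's score is read with 40 dictionary lookups; winners come from a direct comprehension instead of A's append-then-slice trick.
import Mathlib
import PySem

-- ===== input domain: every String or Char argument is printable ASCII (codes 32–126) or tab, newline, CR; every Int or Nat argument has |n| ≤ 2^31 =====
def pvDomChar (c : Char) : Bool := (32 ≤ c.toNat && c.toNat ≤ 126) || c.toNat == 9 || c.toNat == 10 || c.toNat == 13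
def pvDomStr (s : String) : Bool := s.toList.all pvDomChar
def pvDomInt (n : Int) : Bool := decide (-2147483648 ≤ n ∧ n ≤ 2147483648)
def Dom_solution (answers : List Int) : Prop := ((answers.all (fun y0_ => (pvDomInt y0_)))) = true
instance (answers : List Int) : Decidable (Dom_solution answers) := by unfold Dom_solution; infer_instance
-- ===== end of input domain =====

-- B replaces A's fused per-element three-way comparison loop by a one-pass histogram keyed by
-- (index mod 40, answer) — 40 is a common period of all three patterns — from which each
-- pattern's score is read with 40 dictionary lookups (alternative algorithm, same cost).

-- ===== PORT A =====
-- A mutates score[0..2] in one loop over indices; the triple models the three slots.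
-- All list indexings of A are in range (x ∈ [0,len), x%k ∈ [0,k)), so pyGetD is exact;
-- max(score) is on a nonempty 3-list, so max? is some and .getD 0 is exact.
def solution (answers : List Int) : List Int :=
  let n1 : List Int := [1, 2, 3, 4, 5]
  let n2 : List Int := [2, 1, 2, 3, 2, 4, 2, 5]
  let n3 : List Int := [3, 3, 1, 1, 2, 2, 4, 4, 5, 5]
  let sc : Int × Int × Int :=
    (PySem.List.pyRange 0 (answers.length : Int) 1).foldl (fun s x =>
      (if PySem.List.pyGetD n1 (PySem.Int.mod x 5) 0 == PySem.List.pyGetD answers x 0 then s.1 + 1 else s.1,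
       if PySem.List.pyGetD n2 (PySem.Int.mod x 8) 0 == PySem.List.pyGetD answers x 0 then s.2.1 + 1 else s.2.1,
       if PySem.List.pyGetD n3 (PySem.Int.mod x 10) 0 == PySem.List.pyGetD answers x 0 then s.2.2 + 1 else s.2.2))
      (0, 0, 0)
  let score : List Int := [sc.1, sc.2.1, sc.2.2]
  let mx : Int := (PySem.List.max? score (fun y => y)).getD 0
  -- second loop appends winners to score; score[3:] is exactly the appended part, in order
  (PySem.List.pyRange 0 3 1).foldl (fun acc x =>
    if PySem.List.pyGetD score x 0 == mx then acc ++ [x + 1] else acc) []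

-- ===== PORT B =====
-- for i, a in enumerate(answers): hist[(i % 40, a)] = hist.get((i % 40, a), 0) + 1
def pvHist (answers : List Int) : PySem.Dict (Int × Int) Int :=
  (PySem.List.enumerate answers 0).foldl (fun d ia =>
    d.insert (PySem.Int.mod ia.1 40, ia.2) (d.getD (PySem.Int.mod ia.1 40, ia.2) 0 + 1))
    PySem.Dict.empty

-- sum(hist.get((j, pat[j % len(pat)]), 0) for j in range(40))
def pvHistScore (hist : PySem.Dict (Int × Int) Int) (pat : List Int) : Int :=
  ((PySem.List.pyRange 0 40 1).map (fun j =>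
    hist.getD (j, PySem.List.pyGetD pat (PySem.Int.mod j (pat.length : Int)) 0) 0)).sum

def solution_alt (answers : List Int) : List Int :=
  let pats : List (List Int) :=
    [[1, 2, 3, 4, 5], [2, 1, 2, 3, 2, 4, 2, 5], [3, 3, 1, 1, 2, 2, 4, 4, 5, 5]]
  let hist := pvHist answers
  let scores : List Int := pats.map (pvHistScore hist)
  let mx : Int := (PySem.List.max? scores (fun y => y)).getD 0  -- scores nonempty, never none
  (PySem.List.enumerate scores 0).foldl (fun acc p =>
    if p.2 == mx then acc ++ [p.1 + 1] else acc) []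

-- ===== PRECONDITION & SPEC =====
def Spec_solution (answers : List Int) (out : List Int) : Prop := out = solution_alt answers
instance (answers : List Int) (out : List Int) : Decidable (Spec_solution answers out) := by unfold Spec_solution; infer_instance

-- ===== CLAIM =====
def Claim_equal_solution : Prop := ∀ (answers : List Int), Dom_solution answers → Spec_solution answers (solution answers)

-- ===== LEMMAS AND PROOFS =====

-- A's fused loop splits into three independent counting folds.
theorem pv_foldl_triple (l : List Int) (p q r : Int → Bool) (a b c : Int) :
    l.foldl (fun s x =>
      (if p x then s.1 + 1 else s.1,
       if q x then s.2.1 + 1 else s.2.1,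
       if r x then s.2.2 + 1 else s.2.2)) (a, b, c)
    = (l.foldl (fun s x => if p x then s + 1 else s) a,
       l.foldl (fun s x => if q x then s + 1 else s) b,
       l.foldl (fun s x => if r x then s + 1 else s) c) := by
  induction l generalizing a b c with
  | nil => rfl
  | cons h t ih => simp only [List.foldl_cons]; exact ih _ _ _

-- counting fold = countP (as an Int)
theorem pv_foldl_countP (l : List Int) (p : Int → Bool) (a : Int) :
    l.foldl (fun s i => if p i then s + 1 else s) a = a + (l.countP p : Int) := by
  induction l generalizing a with
  | nil => simp
  | cons h t ih =>
    simp only [List.foldl_cons, List.countP_cons, ih]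
    by_cases hp : p h
    · simp [hp]
      ring
    · simp [hp]

-- the histogram's lookups are counts of the key list
theorem pv_hist_getD (answers : List Int) (v : Int × Int) :
    (pvHist answers).getD v 0
    = (((PySem.List.enumerate answers 0).map (fun ia => (PySem.Int.mod ia.1 40, ia.2))).count v : Int) := by
  unfold pvHist
  have h := List.foldl_map (f := fun ia : Int × Int => (PySem.Int.mod ia.1 40, ia.2))
    (g := fun (d : PySem.Dict (Int × Int) Int) k => d.insert k (d.getD k 0 + 1))
    (l := PySem.List.enumerate answers 0) (init := PySem.Dict.empty)
  simp only [] at h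
  rw [← h, PySem.Dict.getD_foldl_insert_add_one]
  simp

-- indicator sums over a list the key misses / hits exactly once
theorem pv_ind_zero (l : List Int) (m a : Int) (w : Int → Int) (hm : m ∉ l) :
    (l.map (fun j => if ((m, a) : Int × Int) = (j, w j) then (1:Int) else 0)).sum = 0 := by
  induction l with
  | nil => rfl
  | cons h t ih =>
    simp only [List.map_cons, List.sum_cons]
    rw [if_neg (by rintro ⟨rfl, -⟩; exact hm (List.mem_cons_self ..)), ih (fun ht => hm (List.mem_cons_of_mem _ ht))]
    ring

theorem pv_ind_list (l : List Int) (hn : l.Nodup) (m a : Int) (w : Int → Int) (hm : m ∈ l) :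
    (l.map (fun j => if ((m, a) : Int × Int) = (j, w j) then (1:Int) else 0)).sum
    = if a = w m then 1 else 0 := by
  induction l with
  | nil => cases hm
  | cons h t ih =>
    simp only [List.map_cons, List.sum_cons]
    rcases List.mem_cons.mp hm with rfl | hmt
    · rw [pv_ind_zero t m a w (List.nodup_cons.mp hn).1]
      simp [Prod.ext_iff]
    · rw [if_neg (by rintro ⟨rfl, -⟩; exact (List.nodup_cons.mp hn).1 hmt),
          ih (List.nodup_cons.mp hn).2 hmt]
      ring

-- the 40 histogram lookups of a pattern are the countP of matches over the index list
theorem pv_hist_sum (l : List Int) (w g : Int → Int) :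
    ((PySem.List.pyRange 0 40 1).map (fun j =>
      ((l.map (fun i => (PySem.Int.mod i 40, g i))).count (j, w j) : Int))).sum
    = (l.countP (fun i => w (PySem.Int.mod i 40) == g i) : Int) := by
  induction l with
  | nil => simp
  | cons x t ih =>
    simp only [List.map_cons, List.count_cons, List.countP_cons]
    have hsplit : (fun j =>
        ((List.count (j, w j) (List.map (fun i => (PySem.Int.mod i 40, g i)) t) +
          if ((PySem.Int.mod x 40, g x) == (j, w j)) = true then 1 else 0 : Nat) : Int))
        = fun j => (List.count (j, w j) (List.map (fun i => (PySem.Int.mod i 40, g i)) t) : Int)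
            + (fun j => if ((PySem.Int.mod x 40, g x) : Int × Int) = (j, w j) then (1:Int) else 0) j := by
      funext j
      simp
    rw [hsplit, PySem.List.sum_map_add_int, ih,
        pv_ind_list (PySem.List.pyRange 0 40 1)
          (by decide)
          (PySem.Int.mod x 40) (g x) w
          (PySem.List.mem_pyRange_one.mpr ⟨PySem.Int.mod_nonneg x (by norm_num), PySem.Int.mod_lt x (by norm_num)⟩)]
    have hb : ∀ u v : Int, (u == v) = decide (v = u) := by
      intro u v
      by_cases h : u = v
      · subst h; simp
      · rw [beq_eq_false_iff_ne.mpr h, decide_eq_false (fun hh => h hh.symm)]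
    rw [hb]
    by_cases h : g x = w (PySem.Int.mod x 40)
    · simp only [h, decide_true, if_true]
      push_cast
      ring
    · simp only [h, decide_false]
      push_cast
      ring

-- (i % 40) % L = i % L when L divides 40
theorem pv_mod_mod (i L : Int) (hL : 0 < L) (hd : L ∣ 40) :
    PySem.Int.mod (PySem.Int.mod i 40) L = PySem.Int.mod i L := by
  rw [PySem.Int.mod_eq_emod_of_pos (show (0:Int) < 40 by norm_num),
      PySem.Int.mod_eq_emod_of_pos hL, PySem.Int.mod_eq_emod_of_pos hL]
  exact Int.emod_emod_of_dvd i hd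

-- B's per-pattern score equals A's counting fold over the index range
theorem pv_score_eq (answers pat : List Int) (hL : 0 < (pat.length : Int)) (hd : (pat.length : Int) ∣ 40) :
    pvHistScore (pvHist answers) pat
    = (PySem.List.pyRange 0 (answers.length : Int) 1).foldl (fun s x =>
        if PySem.List.pyGetD pat (PySem.Int.mod x (pat.length : Int)) 0 == PySem.List.pyGetD answers x 0
        then s + 1 else s) 0 := by
  unfold pvHistScore
  simp only [pv_hist_getD]
  rw [PySem.List.enumerate_eq_map_pyRange (d := 0), List.map_map]
  have hmap : ((fun ia : Int × Int => (PySem.Int.mod ia.1 40, ia.2)) ∘ fun j => (j, PySem.List.pyGetD answers j 0))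
      = fun i => (PySem.Int.mod i 40, PySem.List.pyGetD answers i 0) := rfl
  rw [hmap]
  have hs := pv_hist_sum (PySem.List.pyRange 0 (answers.length : Int) 1)
        (fun j => PySem.List.pyGetD pat (PySem.Int.mod j (pat.length : Int)) 0)
        (fun i => PySem.List.pyGetD answers i 0)
  simp only [PySem.List.len_eq] at hs ⊢
  rw [hs]
  rw [pv_foldl_countP]
  have hpred : (fun i => PySem.List.pyGetD pat (PySem.Int.mod (PySem.Int.mod i 40) (pat.length : Int)) 0 == PySem.List.pyGetD answers i 0)
      = (fun i => PySem.List.pyGetD pat (PySem.Int.mod i (pat.length : Int)) 0 == PySem.List.pyGetD answers i 0) := by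
    funext i; rw [pv_mod_mod i _ hL hd]
  rw [hpred]
  simp

-- winners: A's range(3)+indexing fold equals B's enumerate fold, for any three scores.
theorem pv_tail_eq (s1 s2 s3 mx : Int) :
    (PySem.List.pyRange 0 3 1).foldl (fun acc x =>
      if PySem.List.pyGetD [s1, s2, s3] x 0 == mx then acc ++ [x + 1] else acc) ([] : List Int)
    = (PySem.List.enumerate [s1, s2, s3] 0).foldl (fun acc p =>
      if p.2 == mx then acc ++ [p.1 + 1] else acc) [] := by
  rw [PySem.List.pyRange_one_cons (by norm_num), PySem.List.pyRange_one_cons (by norm_num),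
      PySem.List.pyRange_one_cons (by norm_num), PySem.List.pyRange_one_eq_nil (by norm_num)]
  simp [PySem.List.enumerate_cons, PySem.List.enumerate_nil, PySem.List.pyGetD]

-- ===== VERDICT (by name: the statement is the Claim_ definition above) =====
theorem solution_spec : Claim_equal_solution := by
  intro answers _
  show solution answers = solution_alt answers
  simp only [solution, solution_alt, List.map, pv_foldl_triple]
  rw [pv_tail_eq]
  simp only [pv_score_eq answers [1, 2, 3, 4, 5] (by norm_num) (by norm_num),
      pv_score_eq answers [2, 1, 2, 3, 2, 4, 2, 5] (by norm_num) (by norm_num),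
      pv_score_eq answers [3, 3, 1, 1, 2, 2, 4, 4, 5, 5] (by norm_num) (by norm_num)]
  rfl
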